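-- pv_equiv track=rewrite | github.com/ALMOWAFI/hackthon | math_analyzer/paper_grading.py | _paragraph_indices
-- ===== SOURCE A (Python) =====
-- def _paragraph_indices(text):
--     """Calculate the start and end indices of each paragraph in the text."""
--     indices = []
--     start = 0
--     for paragraph in text.split('\n\n'):
--         end = start + len(paragraph)
--         indices.append({"start": start, "end": end})
--         start = end + 2  # +2 for the '\n\n'
--     return indices
-- ===== SOURCE B (Python) =====
-- def _paragraph_indices(text):
--     """Calculate the start and end indices of each paragraph in the text."""
--     indices = []
--     pos = 0
--     while True:
--         i = text.find('\n\n', pos)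
--         if i == -1:
--             indices.append({"start": pos, "end": len(text)})
--             return indices
--         indices.append({"start": pos, "end": i})
--         pos = i + 2
-- ===== Notes on version B (the rewrite author's own statement) =====
-- stated objective: idiomatic
-- what changed: B scans the raw string with str.find for the blank-line separator, emitting each paragraph's start/end directly from separator positions, instead of building the substring list via split and re-accumulating piece lengths.
import Mathlib
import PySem

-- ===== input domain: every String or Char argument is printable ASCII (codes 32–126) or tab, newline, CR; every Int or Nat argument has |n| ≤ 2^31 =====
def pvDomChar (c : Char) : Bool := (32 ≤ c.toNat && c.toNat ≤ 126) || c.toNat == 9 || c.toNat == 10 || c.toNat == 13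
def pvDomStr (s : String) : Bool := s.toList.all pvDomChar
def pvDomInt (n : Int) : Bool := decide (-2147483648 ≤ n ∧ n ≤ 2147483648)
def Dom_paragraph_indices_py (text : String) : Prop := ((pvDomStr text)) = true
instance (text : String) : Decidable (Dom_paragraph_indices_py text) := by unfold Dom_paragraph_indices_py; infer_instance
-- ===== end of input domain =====

-- B scans the raw string with find('\n\n', pos), emitting index pairs straight from separator
-- positions instead of splitting into substrings and re-accumulating lengths (idiomatic, same cost).


-- ===== PORT A =====
-- text.split('\n\n') is PySem.Chars.splitOn on the code points (the separator is non-empty,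
-- so Python's split never raises); the fold carries (indices, start) exactly as A's loop does.
def paragraph_indices_py (text : String) : List (List (String × Int)) :=
  ((PySem.Chars.splitOn text.toList ['\n', '\n']).foldl
    (fun (st : List (List (String × Int)) × Int) paragraph =>
      (st.1 ++ [[("start", st.2), ("end", st.2 + (paragraph.length : Int))]],
       st.2 + (paragraph.length : Int) + 2))
    (([] : List (List (String × Int))), (0 : Int))).1

-- ===== PORT B =====
-- The while-loop of Source B: i = text.find('\n\n', pos) is PySem.Chars.findFrom; `indices` is acc.
def pvParaGo (cs : List Char) (pos : Nat) (acc : List (List (String × Int))) :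
    List (List (String × Int)) :=
  let i := PySem.Chars.findFrom cs ['\n', '\n'] (pos : Int) none
  if h : i = -1 then acc ++ [[("start", (pos : Int)), ("end", (cs.length : Int))]]
  else pvParaGo cs (i.toNat + 2) (acc ++ [[("start", (pos : Int)), ("end", i)]])
termination_by cs.length + 1 - pos
decreasing_by
  by_cases hp : pos ≤ cs.length
  · have hs := PySem.Chars.findFrom_natCast_spec cs ['\n', '\n'] pos hp h
    have h1 : (pos : Int) ≤ PySem.Chars.findFrom cs ['\n', '\n'] (pos : Int) none := hs.1
    omega
  · exfalso
    apply h
    have hlt : (cs.length : Int) < (pos : Int) := by exact_mod_cast Nat.lt_of_not_le hp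
    show PySem.Chars.findFrom cs ['\n', '\n'] (pos : Int) none = -1
    unfold PySem.Chars.findFrom
    dsimp only
    split_ifs <;> omega

def paragraph_indices_py_alt (text : String) : List (List (String × Int)) :=
  pvParaGo text.toList 0 []

-- ===== PRECONDITION & SPEC =====
def Spec_paragraph_indices_py (text : String) (out : List (List (String × Int))) : Prop := out = paragraph_indices_py_alt text
instance (text : String) (out : List (List (String × Int))) : Decidable (Spec_paragraph_indices_py text out) := by unfold Spec_paragraph_indices_py; infer_instance

-- ===== CLAIM (what is proved, stated in full; the proofs are below) =====
def Claim_equal_paragraph_indices_py : Prop := ∀ (text : String), Dom_paragraph_indices_py text → Spec_paragraph_indices_py text (paragraph_indices_py text)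

-- ===== LEMMAS AND PROOFS =====

-- Proof-only reformulation of split('\n\n') driven by first-occurrence positions.
def pvSplit (l : List Char) : List (List Char) :=
  if PySem.Chars.find l ['\n', '\n'] = -1 then [l]
  else l.take (PySem.Chars.find l ['\n', '\n']).toNat ::
       pvSplit (l.drop ((PySem.Chars.find l ['\n', '\n']).toNat + 2))
termination_by l.length
decreasing_by
  have hnn : 0 ≤ PySem.Chars.find l ['\n', '\n'] := by
    have := PySem.Chars.neg_one_le_find l ['\n', '\n']
    omega
  have hpre := (PySem.Chars.find_spec hnn).1
  have hlen : (PySem.Chars.find l ['\n', '\n']).toNat + 2 ≤ l.length := by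
    have := hpre.length_le
    simp [List.length_drop] at this
    omega
  simp [List.length_drop]
  omega

lemma pvSplit_ne_nil (l : List Char) : pvSplit l ≠ [] := by
  rw [pvSplit]; split <;> simp

lemma pvFind_nonneg_facts (l : List Char) (h : PySem.Chars.find l ['\n', '\n'] ≠ -1) :
    0 ≤ PySem.Chars.find l ['\n', '\n'] ∧
    (PySem.Chars.find l ['\n', '\n']).toNat + 2 ≤ l.length := by
  have hnn : 0 ≤ PySem.Chars.find l ['\n', '\n'] := by
    have := PySem.Chars.neg_one_le_find l ['\n', '\n']
    omega
  refine ⟨hnn, ?_⟩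
  have hpre := (PySem.Chars.find_spec hnn).1
  have := hpre.length_le
  simp [List.length_drop] at this
  omega

-- find equals m when m is a (minimal) occurrence position.
lemma pvFind_eq (l sub : List Char) (m : Nat) (hocc : sub <+: l.drop m)
    (hmin : ∀ i : Nat, i < m → ¬ sub <+: l.drop i) :
    PySem.Chars.find l sub = (m : Int) := by
  have hinf : sub <:+: l := hocc.isInfix.trans (List.drop_suffix m l).isInfix
  have hnn : 0 ≤ PySem.Chars.find l sub := (PySem.Chars.find_nonneg_iff l sub).2 hinf
  obtain ⟨hpre, hmin'⟩ := PySem.Chars.find_spec hnn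
  rcases Nat.lt_trichotomy (PySem.Chars.find l sub).toNat m with hlt | heq | hgt
  · exact absurd hpre (hmin _ hlt)
  · omega
  · exact absurd hocc (hmin' m hgt)

lemma pvFind_zero_of_prefix (l sub : List Char) (h : sub <+: l) :
    PySem.Chars.find l sub = 0 :=
  pvFind_eq l sub 0 (by simpa using h) (by omega)

lemma pvFind_cons (c : Char) (rest sub : List Char) (hp : ¬ sub <+: (c :: rest)) :
    PySem.Chars.find (c :: rest) sub =
      if PySem.Chars.find rest sub = -1 then -1 else PySem.Chars.find rest sub + 1 := by
  by_cases hr : PySem.Chars.find rest sub = -1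
  · rw [if_pos hr]
    rw [PySem.Chars.find_eq_neg_one_iff] at hr ⊢
    intro hinf
    rcases List.infix_cons_iff.1 hinf with h1 | h2
    · exact hp h1
    · exact hr h2
  · rw [if_neg hr]
    have hnn : 0 ≤ PySem.Chars.find rest sub := by
      have := PySem.Chars.neg_one_le_find rest sub
      omega
    obtain ⟨hpre, hmin⟩ := PySem.Chars.find_spec hnn
    have heq : PySem.Chars.find (c :: rest) sub =
        (((PySem.Chars.find rest sub).toNat + 1 : Nat) : Int) := by
      apply pvFind_eq
      · simpa using hpre
      · intro i hi
        cases i with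
        | zero => simpa using hp
        | succ j =>
          simp only [List.drop_succ_cons]
          exact hmin j (by omega)
    rw [heq]; push_cast; omega

-- splitOn.go unfolding lemmas
lemma pvGo_nil (sep cur' : List Char) (fuel : Nat) (acc : List (List Char)) :
    PySem.Chars.splitOn.go sep fuel [] cur' acc = (cur'.reverse :: acc).reverse := by
  cases fuel <;> simp [PySem.Chars.splitOn.go]

lemma pvGo_cons (sep cur' : List Char) (c : Char) (rest : List Char) (fuel : Nat)
    (acc : List (List Char)) :
    PySem.Chars.splitOn.go sep (fuel + 1) (c :: rest) cur' acc =
      if sep.isPrefixOf (c :: rest) then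
        PySem.Chars.splitOn.go sep fuel ((c :: rest).drop sep.length) [] (cur'.reverse :: acc)
      else PySem.Chars.splitOn.go sep fuel rest (c :: cur') acc := by
  rw [PySem.Chars.splitOn.go]

lemma pvGo_spec (fuel : Nat) : ∀ (l cur' : List Char) (acc : List (List Char)),
    l.length < fuel →
    PySem.Chars.splitOn.go ['\n', '\n'] fuel l cur' acc =
      acc.reverse ++ (cur'.reverse ++ (pvSplit l).headI) :: (pvSplit l).tail := by
  induction fuel with
  | zero => intro l cur' acc h; omega
  | succ fuel ih =>
    intro l cur' acc h
    cases l with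
    | nil =>
      rw [pvGo_nil]
      rw [pvSplit]
      have : PySem.Chars.find ([] : List Char) ['\n', '\n'] = -1 := by decide
      simp [this]
    | cons c rest =>
      rw [pvGo_cons]
      by_cases hp : (['\n', '\n'] : List Char).isPrefixOf (c :: rest)
      · rw [if_pos hp]
        have hpre : (['\n', '\n'] : List Char) <+: (c :: rest) := List.isPrefixOf_iff_prefix.1 hp
        have hf0 : PySem.Chars.find (c :: rest) ['\n', '\n'] = 0 :=
          pvFind_zero_of_prefix _ _ hpre
        have hlen : ((c :: rest).drop 2).length < fuel := by
          simp only [List.length_cons] at h ⊢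
          simp [List.length_drop]; omega
        have hsl : (['\n', '\n'] : List Char).length = 2 := rfl
        rw [hsl, ih _ _ _ hlen]
        have hstep : pvSplit (c :: rest) = [] :: pvSplit ((c :: rest).drop 2) := by
          rw [pvSplit, if_neg (by rw [hf0]; omega), hf0]
          simp
        rcases List.exists_cons_of_ne_nil (pvSplit_ne_nil ((c :: rest).drop 2)) with ⟨x, xs, hx⟩
        rw [hstep, hx]
        simp
      · rw [if_neg hp]
        have hnp : ¬ (['\n', '\n'] : List Char) <+: (c :: rest) := by
          intro hc; exact hp (List.isPrefixOf_iff_prefix.2 hc)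
        have hlen : rest.length < fuel := by
          simp only [List.length_cons] at h; omega
        rw [ih _ _ _ hlen]
        have hfc := pvFind_cons c rest ['\n', '\n'] hnp
        by_cases hr : PySem.Chars.find rest ['\n', '\n'] = -1
        · rw [if_pos hr] at hfc
          conv_rhs => rw [pvSplit, if_pos hfc]
          rw [pvSplit, if_pos hr]
          simp
        · rw [if_neg hr] at hfc
          have hnn : 0 ≤ PySem.Chars.find rest ['\n', '\n'] := by
            have := PySem.Chars.neg_one_le_find rest ['\n', '\n']
            omega
          conv_rhs => rw [pvSplit, if_neg (by rw [hfc]; omega)]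
          rw [pvSplit, if_neg hr]
          rw [hfc]
          have ht : (PySem.Chars.find rest ['\n', '\n'] + 1).toNat =
              (PySem.Chars.find rest ['\n', '\n']).toNat + 1 := by omega
          simp [ht, List.take_succ_cons, List.drop_succ_cons]

lemma pvSplitOn_eq (l : List Char) :
    PySem.Chars.splitOn l ['\n', '\n'] = pvSplit l := by
  have h := pvGo_spec (l.length + 1) l [] [] (by omega)
  rw [PySem.Chars.splitOn] at *
  rcases List.exists_cons_of_ne_nil (pvSplit_ne_nil l) with ⟨x, xs, hx⟩
  rw [h, hx]
  simp

lemma pvFold_eq_go_aux (n : Nat) : ∀ (cs : List Char) (pos : Nat)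
    (acc : List (List (String × Int))), cs.length + 1 - pos ≤ n → pos ≤ cs.length →
    ((pvSplit (cs.drop pos)).foldl
      (fun (st : List (List (String × Int)) × Int) paragraph =>
        (st.1 ++ [[("start", st.2), ("end", st.2 + (paragraph.length : Int))]],
         st.2 + (paragraph.length : Int) + 2))
      (acc, (pos : Int))).1 = pvParaGo cs pos acc := by
  induction n with
  | zero => intro cs pos acc hn hpos; omega
  | succ n ih =>
  intro cs pos acc hn hpos
  rw [pvSplit, pvParaGo]
  rw [PySem.Chars.findFrom_natCast cs ['\n', '\n'] pos hpos]
  by_cases hf : PySem.Chars.find (cs.drop pos) ['\n', '\n'] = -1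
  · rw [if_pos hf]
    simp only [List.foldl_cons, List.foldl_nil]
    rw [dif_pos (by simp [hf])]
    have : (pos : Int) + ((cs.drop pos).length : Int) = (cs.length : Int) := by
      simp only [List.length_drop]; omega
    rw [this]
  · simp only [if_neg hf]
    obtain ⟨hnn, hle⟩ := pvFind_nonneg_facts (cs.drop pos) hf
    simp only [List.length_drop] at hle
    set k : Nat := (PySem.Chars.find (cs.drop pos) ['\n', '\n']).toNat with hk
    have hkeq : PySem.Chars.find (cs.drop pos) ['\n', '\n'] = (k : Int) := by omega
    have hne : ¬ ((pos : Int) + PySem.Chars.find (cs.drop pos) ['\n', '\n'] = -1) := by omega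
    rw [dif_neg hne]
    simp only [List.foldl_cons]
    have htake : ((cs.drop pos).take k).length = k := by
      simp [List.length_take, List.length_drop]; omega
    have hdd : (cs.drop pos).drop (k + 2) = cs.drop (pos + (k + 2)) := by
      rw [List.drop_drop]
    have hrec := ih cs (pos + (k + 2))
      (acc ++ [[("start", (pos : Int)), ("end", (pos : Int) + (k : Int))]])
      (by omega) (by omega)
    rw [htake, hdd, hkeq]
    have hto : ((pos : Int) + (k : Int)).toNat + 2 = pos + (k + 2) := by omega
    have harg : (pos : Int) + (k : Int) + 2 = ((pos + (k + 2) : Nat) : Int) := by push_cast; omega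
    rw [harg, hto]
    exact hrec

lemma pvFold_eq_go (cs : List Char) (pos : Nat) (acc : List (List (String × Int)))
    (hpos : pos ≤ cs.length) :
    ((pvSplit (cs.drop pos)).foldl
      (fun (st : List (List (String × Int)) × Int) paragraph =>
        (st.1 ++ [[("start", st.2), ("end", st.2 + (paragraph.length : Int))]],
         st.2 + (paragraph.length : Int) + 2))
      (acc, (pos : Int))).1 = pvParaGo cs pos acc :=
  pvFold_eq_go_aux (cs.length + 1 - pos) cs pos acc (le_refl _) hpos

-- ===== VERDICT (by name: the statement is the Claim_ definition above) =====
theorem paragraph_indices_py_spec : Claim_equal_paragraph_indices_py := by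
  intro text _
  unfold Spec_paragraph_indices_py paragraph_indices_py paragraph_indices_py_alt
  rw [pvSplitOn_eq]
  have h := pvFold_eq_go text.toList 0 [] (by omega)
  simpa using h
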